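-- pv_equiv track=rewrite | github.com/Amitshukla2308/human-ai-brain-graph | src/build_vault.py | _co_mentions_by_session
-- ===== SOURCE A (Python) =====
-- from collections import Counter, defaultdict
--
-- def _co_mentions_by_session(events: list[dict]) -> dict[str, Counter]:
--     """For each target_id, count co-occurring target_ids across shared sessions."""
--     by_session: dict[str, set] = defaultdict(set)
--     for e in events:
--         by_session[e["session_id"]].add(e["target_id"])
--     co: dict[str, Counter] = defaultdict(Counter)
--     for sid, tids in by_session.items():
--         tids_list = list(tids)
--         for i, a in enumerate(tids_list):
--             for b in tids_list[i + 1:]: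
--                 co[a][b] += 1
--                 co[b][a] += 1
--     return co
-- ===== SOURCE B (Python) =====
-- from collections import Counter, defaultdict
-- from itertools import combinations
--
-- def _co_mentions_by_session(events: list[dict]) -> dict:
--     """For each target_id, count co-occurring target_ids across shared sessions."""
--     # inverted index: target_id -> set of sessions mentioning it
--     by_session: dict[str, dict] = {}
--     sessions_of: dict[str, set] = defaultdict(set)
--     for e in events:
--         by_session.setdefault(e["session_id"], {})[e["target_id"]] = None
--         sessions_of[e["target_id"]].add(e["session_id"])
--     co = defaultdict(Counter)
--     done = set()
--     for tids in by_session.values():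
--         for a, b in combinations(tids, 2):
--             if (a, b) not in done:
--                 done.add((a, b))
--                 done.add((b, a))
--                 c = len(sessions_of[a] & sessions_of[b])
--                 co[a][b] = c
--                 co[b][a] = c
--     return co
-- ===== Notes on version B (the rewrite author's own statement) =====
-- stated objective: alternative
-- what changed: Instead of A's nested defaultdict(Counter) accumulated +1 by +1 over every session's pair occurrences, B builds an inverted index sessions_of: target_id -> set of sessions in the same grouping pass, and writes each pair's total count exactly once (at its first co-occurring session, tracked by a done set) as the size of the set intersection sessions_of[a] & sessions_of[b].
import Mathlib
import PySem

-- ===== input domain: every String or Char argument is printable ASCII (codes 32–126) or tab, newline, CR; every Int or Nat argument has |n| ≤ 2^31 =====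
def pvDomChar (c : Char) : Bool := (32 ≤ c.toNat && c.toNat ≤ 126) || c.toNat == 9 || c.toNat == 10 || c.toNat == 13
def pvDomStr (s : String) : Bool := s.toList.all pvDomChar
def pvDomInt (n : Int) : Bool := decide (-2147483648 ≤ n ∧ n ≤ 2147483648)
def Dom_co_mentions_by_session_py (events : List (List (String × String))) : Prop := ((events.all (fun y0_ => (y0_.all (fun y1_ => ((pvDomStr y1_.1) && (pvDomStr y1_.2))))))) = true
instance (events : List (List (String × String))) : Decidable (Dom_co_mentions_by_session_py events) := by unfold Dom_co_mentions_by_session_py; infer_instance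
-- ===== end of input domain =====

-- B replaces A's incremental nested-Counter updates by an inverted index (target_id -> set of
-- sessions): each pair's total count is computed once as the size of a set intersection and
-- assigned, instead of being accumulated +1 by +1 (objective: alternative).

-- ===== PORT A =====
def co_mentions_by_session_py (events : List (List (String × String))) : List (String × List (String × Int)) :=
  -- by_session = defaultdict(set); for e in events: by_session[e["session_id"]].add(e["target_id"])
  let bySession : PySem.Dict String (PySem.Set String) :=
    events.foldl (fun d e =>
      d.modify ((List.lookup "session_id" e).getD "") PySem.Set.empty
        (fun tids => tids.add ((List.lookup "target_id" e).getD ""))) PySem.Dict.empty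
  -- co = defaultdict(Counter); for sid, tids: for i, a in enumerate(list(tids)): for b in tids_list[i+1:] …
  let co : PySem.Dict String (PySem.Dict String Int) :=
    bySession.items.foldl (fun co st =>
      let tidsList := st.2
      (PySem.List.enumerate tidsList).foldl (fun co ia =>
        (PySem.List.slice tidsList (some (ia.1 + 1)) none).foldl (fun co b =>
          let co := co.modify ia.2 PySem.Dict.empty (fun c => c.modify b 0 (· + 1))
          co.modify b PySem.Dict.empty (fun c => c.modify ia.2 0 (· + 1))) co) co) PySem.Dict.empty
  co.items.map (fun p => (p.1, p.2.items))

-- ===== PORT B =====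
def co_mentions_by_session_py_alt (events : List (List (String × String))) : List (String × List (String × Int)) :=
  -- one pass: by_session.setdefault(sid, {})[tid] = None; sessions_of[tid].add(sid)
  let st : PySem.Dict String (PySem.Dict String Unit) × PySem.Dict String (PySem.Set String) :=
    events.foldl (fun st e =>
      (st.1.modify ((List.lookup "session_id" e).getD "") PySem.Dict.empty
         (fun inner => inner.insert ((List.lookup "target_id" e).getD "") ()),
       st.2.modify ((List.lookup "target_id" e).getD "") PySem.Set.empty
         (fun s => s.add ((List.lookup "session_id" e).getD ""))))
      (PySem.Dict.empty, PySem.Dict.empty)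
  -- co = defaultdict(Counter); done = set()
  -- for tids in by_session.values(): for a, b in combinations(tids, 2): if (a, b) not in done: …
  let fin : PySem.Set (String × String) × PySem.Dict String (PySem.Dict String Int) :=
    st.1.values.foldl (fun fin tids =>
      (PySem.List.combinations tids.keys 2).foldl (fun fin c =>
        match c with
        | [a, b] =>
          if fin.1.contains (a, b) then fin
          else
            let done := (fin.1.add (a, b)).add (b, a)
            -- c = len(sessions_of[a] & sessions_of[b]); a and b always occur in sessions_of,
            -- so the defaultdict read is a plain lookup (getD is exact here)
            let cnt : Int := PySem.Set.len (PySem.Set.inter (st.2.getD a PySem.Set.empty) (st.2.getD b PySem.Set.empty))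
            let co := (fin.2.modify a PySem.Dict.empty (fun r => r.insert b cnt)).modify b PySem.Dict.empty (fun r => r.insert a cnt)
            (done, co)
        | _ => fin) fin)
      (PySem.Set.empty, PySem.Dict.empty)
  fin.2.items.map (fun p => (p.1, p.2.items))

-- ===== PRECONDITION & SPEC =====
-- Pre_ excludes exactly the events on which Python A raises KeyError: a dict missing "session_id" or "target_id".
def Pre_co_mentions_by_session_py (events : List (List (String × String))) : Prop :=
  ∀ e ∈ events, "session_id" ∈ e.map Prod.fst ∧ "target_id" ∈ e.map Prod.fst
instance (events : List (List (String × String))) : Decidable (Pre_co_mentions_by_session_py events) := by unfold Pre_co_mentions_by_session_py; infer_instance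
def pvWitness_co_mentions_by_session_py : (List (List (String × String))) :=
  [[("session_id", "s"), ("target_id", "a")], [("session_id", "s"), ("target_id", "b")]]
def Spec_co_mentions_by_session_py (events : List (List (String × String))) (out : List (String × List (String × Int))) : Prop := out = co_mentions_by_session_py_alt events
instance (events : List (List (String × String))) (out : List (String × List (String × Int))) : Decidable (Spec_co_mentions_by_session_py events out) := by unfold Spec_co_mentions_by_session_py; infer_instance

-- ===== CLAIM (what is proved, stated in full; the proofs are below) =====
def Claim_equal_co_mentions_by_session_py : Prop := ∀ (events : List (List (String × String))), Dom_co_mentions_by_session_py events → Pre_co_mentions_by_session_py events → Spec_co_mentions_by_session_py events (co_mentions_by_session_py events)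

-- ===== LEMMAS AND PROOFS =====

-- all ordered pairs (i < j) of a list, in A's (and combinations') enumeration order
def pairs2 {α : Type} : List α → List (α × α)
  | [] => []
  | x :: xs => (xs.map (fun y => (x, y))) ++ pairs2 xs

-- one co[a][b] += 1 update of the nested dict
def coInc (co : PySem.Dict String (PySem.Dict String Int)) (p : String × String) : PySem.Dict String (PySem.Dict String Int) :=
  co.modify p.1 PySem.Dict.empty (fun c => c.modify p.2 0 (· + 1))

-- one co[a][b] = c insertion
def rStep (co : PySem.Dict String (PySem.Dict String Int)) (q : (String × String) × Int) : PySem.Dict String (PySem.Dict String Int) :=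
  co.modify q.1.1 PySem.Dict.empty (fun c => c.insert q.1.2 q.2)

-- the ordered-pair increment sequence one session's tid list generates
def opsOf (tids : List String) : List (String × String) :=
  (pairs2 tids).flatMap (fun p => [p, (p.2, p.1)])

-- canonical value of the nested dict after processing an increment sequence ops
def canonRow (ops : List (String × String)) (a : String) : List (String × Int) :=
  (PySem.Set.ofList ((ops.filter (fun p => p.1 == a)).map Prod.snd)).map (fun b => (b, (ops.count (a, b) : Int)))
def canonCo (ops : List (String × String)) : PySem.Dict String (PySem.Dict String Int) :=
  PySem.Dict.mk ((PySem.Set.ofList (ops.map Prod.fst)).map (fun a => (a, PySem.Dict.mk (canonRow ops a))))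

lemma foldl_flatMap' {α β γ : Type} (l : List α) (f : α → List β) (g : γ → β → γ) (c : γ) :
    (l.flatMap f).foldl g c = l.foldl (fun c x => (f x).foldl g c) c := by
  induction l generalizing c with
  | nil => rfl
  | cons x xs ih => simp [List.flatMap_cons, List.foldl_append, ih]

lemma foldl_pairs_double {α β : Type} (l : List (α × α)) (g : β → α × α → β) (c : β) :
    ((l.flatMap (fun p => [p, (p.2, p.1)])).foldl g c)
      = l.foldl (fun c p => g (g c p) (p.2, p.1)) c := by
  rw [foldl_flatMap']; rfl

lemma foldl_enum_slice {β : Type} (full : List String) (g : β → String → String → β) :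
    ∀ (fuel n : Nat), full.length - n ≤ fuel → ∀ (c : β),
    (PySem.List.enumerate (full.drop n) (n : Int)).foldl
      (fun co ia => (PySem.List.slice full (some (ia.1 + 1)) none).foldl (fun co b => g co ia.2 b) co) c
    = (pairs2 (full.drop n)).foldl (fun co p => g co p.1 p.2) c := by
  intro fuel
  induction fuel with
  | zero =>
      intro n hn c
      have : full.drop n = [] := List.drop_eq_nil_of_le (by omega)
      simp [this, pairs2]
  | succ fuel ih =>
      intro n hn c
      cases h : full.drop n with
      | nil => simp [PySem.List.enumerate, pairs2]
      | cons x xs =>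
          have hxs : full.drop (n + 1) = xs := by
            rw [← List.drop_drop, h, List.drop_one, List.tail_cons]
          have hlen : full.length - (n + 1) ≤ fuel := by
            have : n < full.length := by
              by_contra hc
              simp [List.drop_eq_nil_of_le (by omega : full.length ≤ n)] at h
            omega
          have hslice : PySem.List.slice full (some ((n : Int) + 1)) none = xs := by
            have : ((n : Int) + 1) = ((n + 1 : Nat) : Int) := by push_cast; ring
            rw [this, PySem.List.slice_from_natCast, hxs]
          rw [PySem.List.enumerate_cons, List.foldl_cons]
          simp only [hslice, pairs2, List.foldl_append, List.foldl_map]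
          have := ih (n + 1) hlen ((xs.foldl (fun co b => g co x b) c))
          rw [hxs] at this
          rw [← this]
          rfl

lemma combinations_two {α : Type} (xs : List α) :
    PySem.List.combinations xs 2 = (pairs2 xs).map (fun p => [p.1, p.2]) := by
  induction xs with
  | nil => simp [PySem.List.combinations_nil_succ, pairs2]
  | cons x xs ih =>
      simp [PySem.List.combinations_cons_succ, PySem.List.combinations_one, pairs2, ih,
        List.map_map, Function.comp]

-- lookup through a value-mapped literal dict
lemma get?_mk_mapval {ν ν' : Type} (l : List (String × ν)) (g : ν → ν') (k : String) :
    (PySem.Dict.mk (l.map (fun (q : String × ν) => (q.1, g q.2)))).get? k = ((PySem.Dict.mk l).get? k).map g := by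
  induction l with
  | nil => rfl
  | cons q l ih =>
      obtain ⟨qk, qv⟩ := q
      by_cases h : qk == k <;>
        simp [PySem.Dict.get?_mk_cons, h, ih]

lemma get?_mk_setmap {ν : Type} (S : List String) (g : String → ν) (a : String) :
    (PySem.Dict.mk (S.map (fun x => (x, g x)))).get? a = if a ∈ S then some (g a) else none := by
  induction S with
  | nil => rfl
  | cons x S ih =>
      simp only [List.map_cons, PySem.Dict.get?_mk_cons, ih]
      by_cases h : x = a
      · subst h; simp
      · simp [Ne.symm h, beq_eq_false_iff_ne.mpr h]

lemma set_filter_ofList {α : Type} [BEq α] [LawfulBEq α] (l : List α) (q : α → Bool) :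
    (PySem.Set.ofList l).filter q = PySem.Set.ofList (l.filter q) := by
  induction l using List.reverseRecOn with
  | nil => rfl
  | append_singleton l x ih =>
      rw [PySem.Set.ofList_append_singleton, List.filter_append]
      by_cases hx : x ∈ PySem.Set.ofList l
      · rw [PySem.Set.add_of_mem hx]
        by_cases hq : q x
        · have hxf : x ∈ PySem.Set.ofList (l.filter q) := by
            rw [PySem.Set.mem_ofList] at hx ⊢
            exact List.mem_filter.mpr ⟨hx, hq⟩
          simp [hq, PySem.Set.ofList_append_singleton, PySem.Set.add_of_mem hxf, ih]
        · simp [hq, ih]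
      · rw [PySem.Set.add_of_not_mem hx, List.filter_append]
        by_cases hq : q x
        · have hxf : x ∉ PySem.Set.ofList (l.filter q) := by
            rw [PySem.Set.mem_ofList] at hx ⊢
            exact fun hc => hx (List.mem_filter.mp hc).1
          simp [hq, PySem.Set.ofList_append_singleton, PySem.Set.add_of_not_mem hxf, ih]
        · simp [hq, ih]

lemma set_ofList_map_ofList {α β : Type} [BEq α] [LawfulBEq α] [BEq β] [LawfulBEq β] (l : List α) (f : α → β) :
    PySem.Set.ofList ((PySem.Set.ofList l).map f) = PySem.Set.ofList (l.map f) := by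
  induction l using List.reverseRecOn with
  | nil => rfl
  | append_singleton l x ih =>
      simp only [PySem.Set.ofList_append_singleton, List.map_append, List.map_singleton]
      by_cases hx : x ∈ PySem.Set.ofList l
      · rw [PySem.Set.add_of_mem hx]
        have : f x ∈ PySem.Set.ofList (l.map f) := by
          rw [PySem.Set.mem_ofList] at hx ⊢
          exact List.mem_map_of_mem hx
        rw [ih, PySem.Set.add_of_mem this]
      · rw [PySem.Set.add_of_not_mem hx, List.map_append, List.map_singleton,
          PySem.Set.ofList_append_singleton, ih]

lemma set_map_snd_ofList (a : String) (M : List (String × String)) (h : ∀ p ∈ M, p.1 = a) :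
    (PySem.Set.ofList M).map Prod.snd = PySem.Set.ofList (M.map Prod.snd) := by
  induction M using List.reverseRecOn with
  | nil => rfl
  | append_singleton M p ih =>
      have hM : ∀ q ∈ M, q.1 = a := fun q hq => h q (List.mem_append_left _ hq)
      have hp : p.1 = a := h p (List.mem_append_right _ (List.mem_singleton_self p))
      have ihM := ih hM
      simp only [PySem.Set.ofList_append_singleton, List.map_append, List.map_singleton]
      by_cases hx : p ∈ PySem.Set.ofList M
      · rw [PySem.Set.add_of_mem hx, ihM]
        have : p.2 ∈ PySem.Set.ofList (M.map Prod.snd) := by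
          rw [PySem.Set.mem_ofList] at hx ⊢
          exact List.mem_map_of_mem hx
        rw [PySem.Set.add_of_mem this]
      · rw [PySem.Set.add_of_not_mem hx, List.map_append, List.map_singleton, ihM]
        have : p.2 ∉ PySem.Set.ofList (M.map Prod.snd) := by
          rw [PySem.Set.mem_ofList] at hx ⊢
          intro hc
          obtain ⟨q, hq, hq2⟩ := List.mem_map.mp hc
          have : q = p := Prod.ext ((hM q hq).trans hp.symm) hq2
          exact hx (this ▸ hq)
        rw [PySem.Set.add_of_not_mem this]

lemma contains_mk_setmap {ν : Type} (S : List String) (g : String → ν) (a : String) :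
    (PySem.Dict.mk (S.map (fun x => (x, g x)))).contains a = decide (a ∈ S) := by
  rw [PySem.Dict.contains_eq_isSome_get?, get?_mk_setmap]
  by_cases h : a ∈ S <;> simp [h]

lemma canonRow_append_ne (ops : List (String × String)) (p : String × String) (a' : String)
    (hne : p.1 ≠ a') : canonRow (ops ++ [p]) a' = canonRow ops a' := by
  unfold canonRow
  have h1 : (ops ++ [p]).filter (fun q => q.1 == a') = ops.filter (fun q => q.1 == a') := by
    simp [List.filter_append, beq_eq_false_iff_ne.mpr hne]
  rw [h1]
  refine List.map_congr_left (fun b hb => ?_)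
  have : (ops ++ [p]).count (a', b) = ops.count (a', b) := by
    rw [List.count_append, List.count_singleton]
    have : ¬ (p == (a', b)) = true := by
      simp only [beq_iff_eq]
      intro hc; exact hne (by rw [hc])
    simp [this]
  rw [this]

-- row update at a = p.1

lemma canonRow_append_self (ops : List (String × String)) (a b : String) :
    canonRow (ops ++ [(a, b)]) a
      = (PySem.Set.ofList ((ops.filter (fun q => q.1 == a)).map Prod.snd)).map
          (fun b' => (b', (ops.count (a, b') : Int) + if b' = b then 1 else 0))
        ++ (if b ∈ PySem.Set.ofList ((ops.filter (fun q => q.1 == a)).map Prod.snd) then []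
            else [(b, (ops.count (a, b) : Int) + 1)]) := by
  unfold canonRow
  have h1 : (ops ++ [(a, b)]).filter (fun q => q.1 == a) = ops.filter (fun q => q.1 == a) ++ [(a, b)] := by
    simp [List.filter_append]
  rw [h1, List.map_append, List.map_singleton, PySem.Set.ofList_append_singleton]
  set T := PySem.Set.ofList ((ops.filter (fun q => q.1 == a)).map Prod.snd) with hT
  have hcnt : ∀ b', ((ops ++ [(a, b)]).count (a, b') : Int)
      = (ops.count (a, b') : Int) + if b' = b then 1 else 0 := by
    intro b'
    rw [List.count_append, List.count_singleton]
    by_cases h : b' = b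
    · subst h; simp
    · have : ¬ ((a, b) == (a, b')) = true := by
        simp only [beq_iff_eq, Prod.mk.injEq]
        rintro ⟨-, hc⟩; exact h hc.symm
      simp [this, h]
  by_cases hb : b ∈ T
  · rw [PySem.Set.add_of_mem hb]
    simp only [hb, if_true, List.append_nil]
    exact List.map_congr_left (fun b' _ => by rw [hcnt])
  · rw [PySem.Set.add_of_not_mem hb, List.map_append, List.map_singleton]
    simp only [hb, if_false]
    congr 1
    · exact List.map_congr_left (fun b' _ => by rw [hcnt])
    · have hc0 : ops.count (a, b) = 0 := by
        rw [List.count_eq_zero]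
        intro hc
        exact hb (by
          rw [hT, PySem.Set.mem_ofList]
          exact List.mem_map.mpr ⟨(a, b), List.mem_filter.mpr ⟨hc, by simp⟩, rfl⟩)
      simp [hc0]

lemma count_zero_of_not_mem_row (ops : List (String × String)) (a b : String)
    (hb : b ∉ PySem.Set.ofList ((ops.filter (fun q => q.1 == a)).map Prod.snd)) :
    ops.count (a, b) = 0 := by
  rw [List.count_eq_zero]
  intro hc
  exact hb (by
    rw [PySem.Set.mem_ofList]
    exact List.mem_map.mpr ⟨(a, b), List.mem_filter.mpr ⟨hc, by simp⟩, rfl⟩)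

lemma filter_eq_nil_of_not_mem_outer (ops : List (String × String)) (a : String)
    (ha : a ∉ PySem.Set.ofList (ops.map Prod.fst)) :
    ops.filter (fun q => q.1 == a) = [] := by
  rw [List.filter_eq_nil_iff]
  intro q hq
  simp only [beq_iff_eq]
  intro hc
  exact ha (by rw [PySem.Set.mem_ofList]; exact hc ▸ List.mem_map_of_mem hq)

lemma row_insert_eq (ops : List (String × String)) (a b : String) :
    (PySem.Dict.mk (canonRow ops a)).insert b ((PySem.Dict.mk (canonRow ops a)).getD b 0 + 1)
      = PySem.Dict.mk (canonRow (ops ++ [(a, b)]) a) := by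
  set T := PySem.Set.ofList ((ops.filter (fun q => q.1 == a)).map Prod.snd) with hT
  have hget : (PySem.Dict.mk (canonRow ops a)).getD b 0
      = if b ∈ T then (ops.count (a, b) : Int) else 0 := by
    rw [PySem.Dict.getD_eq_get?_getD]
    unfold canonRow
    rw [get?_mk_setmap T (fun b' => ((ops.count (a, b') : Int)))]
    by_cases hb : b ∈ T <;> simp [hb]
  have hcon : (PySem.Dict.mk (canonRow ops a)).contains b = decide (b ∈ T) := by
    unfold canonRow
    exact contains_mk_setmap T (fun b' => ((ops.count (a, b') : Int))) b
  by_cases hb : b ∈ T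
  · apply PySem.Dict.ext
    rw [PySem.Dict.items_insert, hcon]
    simp only [hb, decide_true, if_true, hget]
    show (canonRow ops a).map _ = canonRow (ops ++ [(a, b)]) a
    rw [canonRow_append_self, ← hT]
    simp only [hb, if_true, List.append_nil]
    unfold canonRow
    rw [List.map_map, ← hT]
    refine List.map_congr_left (fun b' _ => ?_)
    by_cases hbb : b' = b
    · subst hbb; simp
    · simp [hbb]
  · apply PySem.Dict.ext
    rw [PySem.Dict.items_insert, hcon]
    simp only [hb, decide_false, if_false, hget]
    rw [canonRow_append_self, ← hT]
    simp only [hb, if_false]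
    show canonRow ops a ++ _ = _
    congr 1
    · unfold canonRow
      rw [← hT]
      refine (List.map_congr_left (fun b' hb' => ?_)).symm
      have : b' ≠ b := fun hc => hb (hc ▸ hb')
      simp [this]
    · have h0 : ops.count (a, b) = 0 := count_zero_of_not_mem_row ops a b (hT ▸ hb)
      simp [h0]


lemma canon_step (ops : List (String × String)) (p : String × String) :
    coInc (canonCo ops) p = canonCo (ops ++ [p]) := by
  obtain ⟨a, b⟩ := p
  show (canonCo ops).insert a (((canonCo ops).getD a PySem.Dict.empty).insert b
        ((((canonCo ops).getD a PySem.Dict.empty)).getD b 0 + 1)) = canonCo (ops ++ [(a, b)])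
  have hgo : (canonCo ops).get? a
      = if a ∈ PySem.Set.ofList (ops.map Prod.fst) then some (PySem.Dict.mk (canonRow ops a)) else none := by
    unfold canonCo
    exact get?_mk_setmap _ (fun a' => PySem.Dict.mk (canonRow ops a')) a
  have hco : (canonCo ops).contains a = decide (a ∈ PySem.Set.ofList (ops.map Prod.fst)) := by
    unfold canonCo
    exact contains_mk_setmap _ (fun a' => PySem.Dict.mk (canonRow ops a')) a
  have houter : PySem.Set.ofList ((ops ++ [(a, b)]).map Prod.fst)
      = (PySem.Set.ofList (ops.map Prod.fst)).add a := by
    rw [List.map_append, List.map_singleton, PySem.Set.ofList_append_singleton]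
  by_cases ha : a ∈ PySem.Set.ofList (ops.map Prod.fst)
  · have hgetD : (canonCo ops).getD a PySem.Dict.empty = PySem.Dict.mk (canonRow ops a) := by
      rw [PySem.Dict.getD_eq_get?_getD, hgo, if_pos ha]; rfl
    rw [hgetD, row_insert_eq]
    apply PySem.Dict.ext
    rw [PySem.Dict.items_insert, hco]
    simp only [ha, decide_true, if_true]
    show ((PySem.Set.ofList (ops.map Prod.fst)).map _).map _ = _
    unfold canonCo
    rw [houter, PySem.Set.add_of_mem ha, List.map_map]
    refine List.map_congr_left (fun a' _ => ?_)
    by_cases haa : a' = a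
    · subst haa; simp
    · simp only [Function.comp_apply, beq_eq_false_iff_ne.mpr haa, Bool.false_eq_true, if_false]
      rw [canonRow_append_ne ops (a, b) a' (fun hc => haa (by simpa using hc.symm))]
  · have hgetD : (canonCo ops).getD a PySem.Dict.empty = PySem.Dict.empty := by
      rw [PySem.Dict.getD_eq_get?_getD, hgo, if_neg ha]; rfl
    rw [hgetD]
    apply PySem.Dict.ext
    rw [PySem.Dict.items_insert, hco]
    simp only [ha, decide_false, Bool.false_eq_true, if_false]
    unfold canonCo
    rw [houter, PySem.Set.add_of_not_mem ha, List.map_append, List.map_singleton]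
    congr 1
    · refine (List.map_congr_left (fun a' ha' => ?_)).symm
      have : a ≠ a' := fun hc => ha (hc ▸ ha')
      rw [canonRow_append_ne ops (a, b) a' this]
    · have hf : ops.filter (fun q => q.1 == a) = [] := filter_eq_nil_of_not_mem_outer ops a ha
      have h0 : ops.count (a, b) = 0 := by
        apply count_zero_of_not_mem_row
        rw [hf]
        simp [PySem.Set.ofList]
      rw [canonRow_append_self]
      rw [hf]
      simp [PySem.Set.ofList, h0, PySem.Dict.empty, PySem.Dict.insert, PySem.Dict.getD, PySem.Dict.get?, PySem.Dict.contains]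

lemma coFold_eq_canon (ops : List (String × String)) :
    ops.foldl coInc PySem.Dict.empty = canonCo ops := by
  induction ops using List.reverseRecOn with
  | nil => rfl
  | append_singleton xs p ih => rw [List.foldl_append, List.foldl_cons, List.foldl_nil, ih, canon_step]

lemma reshape_fold (P : List (String × String)) (cnt : String × String → Int) (hnd : P.Nodup) :
    ((P.map (fun k => (k, cnt k))).foldl rStep PySem.Dict.empty)
      = PySem.Dict.mk ((PySem.Set.ofList (P.map Prod.fst)).map (fun a =>
          (a, PySem.Dict.mk ((P.filter (fun p => p.1 == a)).map (fun p => (p.2, cnt p)))))) := by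
  induction P using List.reverseRecOn with
  | nil => rfl
  | append_singleton P p ih =>
      have hnp : p ∉ P := by
        rw [List.nodup_append] at hnd
        exact fun hc => hnd.2.2 p hc p (List.mem_singleton_self p) rfl
      have hndP : P.Nodup := ((List.nodup_append.mp hnd)).1
      rw [List.map_append, List.map_singleton, List.foldl_append, List.foldl_cons, List.foldl_nil,
        ih hndP]
      set S := PySem.Set.ofList (P.map Prod.fst) with hS
      set row : String → List (String × Int) := fun a => (P.filter (fun q => q.1 == a)).map (fun q => (q.2, cnt q)) with hrow
      have hgo : (PySem.Dict.mk (S.map (fun a => (a, PySem.Dict.mk (row a))))).get? p.1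
          = if p.1 ∈ S then some (PySem.Dict.mk (row p.1)) else none :=
        get?_mk_setmap S (fun a => PySem.Dict.mk (row a)) p.1
      have hco : (PySem.Dict.mk (S.map (fun a => (a, PySem.Dict.mk (row a))))).contains p.1
          = decide (p.1 ∈ S) :=
        contains_mk_setmap S (fun a => PySem.Dict.mk (row a)) p.1
      have houter : PySem.Set.ofList ((P ++ [p]).map Prod.fst) = S.add p.1 := by
        rw [List.map_append, List.map_singleton, PySem.Set.ofList_append_singleton]
      have hfilt : ∀ a', (P ++ [p]).filter (fun q => q.1 == a')
          = P.filter (fun q => q.1 == a') ++ if p.1 == a' then [p] else [] := by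
        intro a'; simp [List.filter_append, List.filter_singleton]
      show rStep _ (p, cnt p) = _
      unfold rStep
      show (PySem.Dict.mk (S.map (fun a => (a, PySem.Dict.mk (row a))))).insert p.1
          (((PySem.Dict.mk (S.map (fun a => (a, PySem.Dict.mk (row a))))).getD p.1 PySem.Dict.empty).insert p.2 (cnt p)) = _
      by_cases ha : p.1 ∈ S
      · have hgetD : (PySem.Dict.mk (S.map (fun a => (a, PySem.Dict.mk (row a))))).getD p.1 PySem.Dict.empty
            = PySem.Dict.mk (row p.1) := by
          rw [PySem.Dict.getD_eq_get?_getD, hgo, if_pos ha]; rfl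
        rw [hgetD]
        have hbnot : (PySem.Dict.mk (row p.1)).contains p.2 = false := by
          unfold PySem.Dict.contains
          rw [List.any_eq_false]
          rintro ⟨b', v'⟩ hq
          obtain ⟨q, hqmem, hqeq⟩ := List.mem_map.mp hq
          have hq1 := List.mem_filter.mp hqmem
          simp only [beq_iff_eq] at hq1 ⊢
          intro hc
          apply hnp
          have : q = p := Prod.ext hq1.2 (by
            have := congrArg Prod.fst hqeq
            simp at this
            rw [this, hc])
          exact this ▸ hq1.1
        have hinner : (PySem.Dict.mk (row p.1)).insert p.2 (cnt p)
            = PySem.Dict.mk ((P ++ [p]).filter (fun q => q.1 == p.1) |>.map (fun q => (q.2, cnt q))) := by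
          apply PySem.Dict.ext
          rw [PySem.Dict.items_insert, hbnot]
          simp [hfilt p.1, hrow]
        apply PySem.Dict.ext
        rw [PySem.Dict.items_insert, hco]
        simp only [ha, decide_true, if_true]
        rw [houter, PySem.Set.add_of_mem ha, List.map_map]
        refine List.map_congr_left (fun a' _ => ?_)
        by_cases haa : a' = p.1
        · subst haa
          simp only [Function.comp_apply, BEq.rfl, if_true]
          rw [hinner]
        · simp only [Function.comp_apply, beq_eq_false_iff_ne.mpr haa, Bool.false_eq_true, if_false]
          rw [hfilt a']
          simp [hrow, beq_eq_false_iff_ne.mpr (fun hc : p.1 = a' => haa (hc.symm))]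
      · have hgetD : (PySem.Dict.mk (S.map (fun a => (a, PySem.Dict.mk (row a))))).getD p.1 PySem.Dict.empty
            = PySem.Dict.empty := by
          rw [PySem.Dict.getD_eq_get?_getD, hgo, if_neg ha]; rfl
        rw [hgetD]
        apply PySem.Dict.ext
        rw [PySem.Dict.items_insert, hco]
        simp only [ha, decide_false, Bool.false_eq_true, if_false]
        rw [houter, PySem.Set.add_of_not_mem ha, List.map_append, List.map_singleton]
        congr 1
        · refine (List.map_congr_left (fun a' ha' => ?_)).symm
          have hne : p.1 ≠ a' := fun hc => ha (hc ▸ ha')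
          rw [hfilt a']
          simp [hrow, beq_eq_false_iff_ne.mpr hne]
        · have hf : P.filter (fun q => q.1 == p.1) = [] := by
            rw [List.filter_eq_nil_iff]
            intro q hq
            simp only [beq_iff_eq]
            intro hc
            exact ha (by rw [hS, PySem.Set.mem_ofList]; exact hc ▸ List.mem_map_of_mem hq)
          rw [hfilt p.1, hf]
          simp [PySem.Dict.empty, PySem.Dict.insert, PySem.Dict.contains]

lemma reshape_counter_eq_canon (ops : List (String × String)) :
    ((PySem.Dict.counter ops).items.foldl rStep PySem.Dict.empty) = canonCo ops := by
  rw [PySem.Dict.items_counter, reshape_fold (PySem.Set.ofList ops) (fun k => (ops.count k : Int))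
    (PySem.Set.nodup_ofList ops)]
  unfold canonCo
  rw [set_ofList_map_ofList]
  apply congrArg PySem.Dict.mk
  refine List.map_congr_left (fun a _ => ?_)
  apply congrArg (fun l => (a, PySem.Dict.mk l))
  rw [set_filter_ofList]
  have hall : ∀ p ∈ ops.filter (fun q => q.1 == a), p.1 = a := by
    intro p hp
    simpa using (List.mem_filter.mp hp).2
  have h1 : (PySem.Set.ofList (ops.filter (fun q => q.1 == a))).map (fun p => (p.2, (ops.count p : Int)))
      = (PySem.Set.ofList (ops.filter (fun q => q.1 == a))).map (fun p => ((fun b => (b, (ops.count (a, b) : Int))) p.2)) := by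
    refine List.map_congr_left (fun p hp => ?_)
    have hpa : p.1 = a := hall p ((PySem.Set.mem_ofList _ _).mp hp)
    have : p = (a, p.2) := Prod.ext hpa rfl
    conv_lhs => rw [this]
  rw [h1, show (fun p : String × String => ((fun b => (b, (ops.count (a, b) : Int))) p.2))
      = ((fun b => (b, (ops.count (a, b) : Int))) ∘ Prod.snd) from rfl,
    ← List.map_map, set_map_snd_ofList a _ hall]
  rfl


-- value-mapped literal dicts: contains / getD / insert
lemma contains_mk_mapval {ν ν' : Type} (l : List (String × ν)) (g : ν → ν') (k : String) :
    (PySem.Dict.mk (l.map (fun (q : String × ν) => (q.1, g q.2)))).contains k = (PySem.Dict.mk l).contains k := by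
  rw [PySem.Dict.contains_eq_isSome_get?, PySem.Dict.contains_eq_isSome_get?, get?_mk_mapval]
  cases (PySem.Dict.mk l).get? k <;> rfl

lemma getD_mk_mapval {ν ν' : Type} (l : List (String × ν)) (g : ν → ν') (k : String) (d : ν) (d' : ν')
    (hd : g d = d') :
    (PySem.Dict.mk (l.map (fun (q : String × ν) => (q.1, g q.2)))).getD k d' = g ((PySem.Dict.mk l).getD k d) := by
  rw [PySem.Dict.getD_eq_get?_getD, PySem.Dict.getD_eq_get?_getD, get?_mk_mapval]
  cases (PySem.Dict.mk l).get? k <;> simp [hd]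

lemma insert_mk_mapval {ν ν' : Type} (l : List (String × ν)) (g : ν → ν') (k : String) (v : ν) :
    (PySem.Dict.mk (l.map (fun (q : String × ν) => (q.1, g q.2)))).insert k (g v)
      = PySem.Dict.mk ((((PySem.Dict.mk l).insert k v)).items.map (fun (q : String × ν) => (q.1, g q.2))) := by
  apply PySem.Dict.ext
  rw [PySem.Dict.items_insert, PySem.Dict.items_insert, contains_mk_mapval]
  by_cases hc : (PySem.Dict.mk l).contains k
  · simp only [hc, if_true, List.map_map]
    refine List.map_congr_left (fun q _ => ?_)
    by_cases hq : q.1 = k <;> simp [hq]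
  · simp [hc]

-- (d.insert k v).keys = d.keys.add k
lemma keys_insert_eq_add {ν : Type} (d : PySem.Dict String ν) (k : String) (v : ν) :
    (d.insert k v).keys = PySem.Set.add d.keys k := by
  by_cases hc : d.contains k
  · rw [PySem.Dict.keys_insert_of_contains d v hc,
      PySem.Set.add_of_mem ((PySem.Dict.contains_iff_mem_keys d k).mp hc)]
  · rw [PySem.Dict.keys_insert_of_not_contains d v (by simpa using hc),
      PySem.Set.add_of_not_mem (fun hm => hc ((PySem.Dict.contains_iff_mem_keys d k).mpr hm))]

-- A's grouping pass is B's grouping pass with each per-session dict replaced by its key set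
lemma bySession_rel (events : List (List (String × String))) :
    ∀ dB : PySem.Dict String (PySem.Dict String Unit),
    events.foldl (fun d e =>
        d.modify ((List.lookup "session_id" e).getD "") PySem.Set.empty
          (fun tids => PySem.Set.add tids ((List.lookup "target_id" e).getD "")))
      (PySem.Dict.mk (dB.items.map (fun (q : String × PySem.Dict String Unit) => (q.1, PySem.Dict.keys q.2))))
    = PySem.Dict.mk ((events.foldl (fun d e =>
        d.modify ((List.lookup "session_id" e).getD "") PySem.Dict.empty
          (fun inner => inner.insert ((List.lookup "target_id" e).getD "") ())) dB).items.map
        (fun (q : String × PySem.Dict String Unit) => (q.1, PySem.Dict.keys q.2))) := by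
  induction events with
  | nil => intro dB; rfl
  | cons e events ih =>
      intro dB
      rw [List.foldl_cons, List.foldl_cons]
      have hstep :
          (PySem.Dict.mk (dB.items.map (fun (q : String × PySem.Dict String Unit) => (q.1, PySem.Dict.keys q.2)))).modify
              ((List.lookup "session_id" e).getD "") PySem.Set.empty
              (fun tids => PySem.Set.add tids ((List.lookup "target_id" e).getD ""))
            = PySem.Dict.mk ((dB.modify ((List.lookup "session_id" e).getD "") PySem.Dict.empty
              (fun inner => inner.insert ((List.lookup "target_id" e).getD "") ())).items.map
              (fun (q : String × PySem.Dict String Unit) => (q.1, PySem.Dict.keys q.2))) := by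
        show (PySem.Dict.mk _).insert _ _ = PySem.Dict.mk ((dB.insert _ _).items.map _)
        have hgd : (PySem.Dict.mk (dB.items.map (fun (q : String × PySem.Dict String Unit) => (q.1, PySem.Dict.keys q.2)))).getD
            ((List.lookup "session_id" e).getD "") PySem.Set.empty
            = PySem.Dict.keys (dB.getD ((List.lookup "session_id" e).getD "") PySem.Dict.empty) := by
          have := getD_mk_mapval dB.items PySem.Dict.keys ((List.lookup "session_id" e).getD "")
            PySem.Dict.empty PySem.Set.empty rfl
          simpa using this
        rw [hgd]
        beta_reduce
        rw [show PySem.Set.add (PySem.Dict.keys (dB.getD ((List.lookup "session_id" e).getD "") PySem.Dict.empty))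
            ((List.lookup "target_id" e).getD "")
          = PySem.Dict.keys ((dB.getD ((List.lookup "session_id" e).getD "") PySem.Dict.empty).insert
            ((List.lookup "target_id" e).getD "") ()) from (keys_insert_eq_add _ _ _).symm]
        exact insert_mk_mapval dB.items PySem.Dict.keys _ _
      rw [hstep, ih]

-- A's per-session double loop is a coInc-fold over the session's ordered pairs
lemma sessionA_eq (tids : List String) (co : PySem.Dict String (PySem.Dict String Int)) :
    (PySem.List.enumerate tids).foldl (fun co ia =>
        (PySem.List.slice tids (some (ia.1 + 1)) none).foldl (fun co b =>
          let co := co.modify ia.2 PySem.Dict.empty (fun c => c.modify b 0 (· + 1))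
          co.modify b PySem.Dict.empty (fun c => c.modify ia.2 0 (· + 1))) co) co
      = (opsOf tids).foldl coInc co := by
  have h := foldl_enum_slice tids
    (fun co a b => coInc (coInc co (a, b)) (b, a)) tids.length 0 (by omega) co
  rw [List.drop_zero] at h
  have h2 : (opsOf tids).foldl coInc co
      = (pairs2 tids).foldl (fun co p => coInc (coInc co p) (p.2, p.1)) co := by
    rw [opsOf, foldl_pairs_double]
  exact h.trans h2.symm

-- ===================== new B-side lemmas =====================

-- the two independent components of B's one-pass grouping fold
def groupF (d : PySem.Dict String (PySem.Dict String Unit)) (e : List (String × String)) : PySem.Dict String (PySem.Dict String Unit) :=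
  d.modify ((List.lookup "session_id" e).getD "") PySem.Dict.empty
    (fun inner => inner.insert ((List.lookup "target_id" e).getD "") ())
def invF (s : PySem.Dict String (PySem.Set String)) (e : List (String × String)) : PySem.Dict String (PySem.Set String) :=
  s.modify ((List.lookup "target_id" e).getD "") PySem.Set.empty
    (fun t => t.add ((List.lookup "session_id" e).getD ""))

lemma split_fold (events : List (List (String × String))) :
    ∀ (d : PySem.Dict String (PySem.Dict String Unit)) (s : PySem.Dict String (PySem.Set String)),
    events.foldl (fun st e =>
      (st.1.modify ((List.lookup "session_id" e).getD "") PySem.Dict.empty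
         (fun inner => inner.insert ((List.lookup "target_id" e).getD "") ()),
       st.2.modify ((List.lookup "target_id" e).getD "") PySem.Set.empty
         (fun s => s.add ((List.lookup "session_id" e).getD ""))))
      (d, s)
    = (events.foldl groupF d, events.foldl invF s) := by
  induction events with
  | nil => intro d s; rfl
  | cons e events ih => intro d s; exact ih (groupF d e) (invF s e)

lemma pairs2_mem {α : Type} (l : List α) (p : α × α) (hp : p ∈ pairs2 l) :
    p.1 ∈ l ∧ p.2 ∈ l := by
  induction l with
  | nil => cases hp
  | cons x xs ih =>
      rw [pairs2, List.mem_append] at hp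
      rcases hp with hp | hp
      · obtain ⟨y, hy, hyp⟩ := List.mem_map.mp hp
        subst hyp
        exact ⟨List.mem_cons_self, List.mem_cons_of_mem _ hy⟩
      · exact ⟨List.mem_cons_of_mem _ (ih hp).1, List.mem_cons_of_mem _ (ih hp).2⟩

lemma pairs2_ne {α : Type} (l : List α) (hnd : l.Nodup) (p : α × α) (hp : p ∈ pairs2 l) :
    p.1 ≠ p.2 := by
  induction l with
  | nil => cases hp
  | cons x xs ih =>
      rw [pairs2, List.mem_append] at hp
      rcases hp with hp | hp
      · obtain ⟨y, hy, hyp⟩ := List.mem_map.mp hp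
        subst hyp
        intro hc
        have hc' : x = y := hc
        exact (List.nodup_cons.mp hnd).1 (by rw [hc']; exact hy)
      · exact ih (List.nodup_cons.mp hnd).2 hp

lemma count_map_pair {α : Type} [BEq α] [LawfulBEq α] [DecidableEq α] (xs : List α) (x a b : α) :
    (xs.map (fun y => (x, y))).count (a, b) = if x = a then xs.count b else 0 := by
  induction xs with
  | nil => simp
  | cons y ys ih =>
      simp only [List.map_cons, List.count_cons, ih]
      by_cases hx : x = a
      · subst hx
        by_cases hy : y = b
        · subst hy; simp
        · simp [hy, Prod.ext_iff]
      · simp [hx, Prod.ext_iff]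

lemma count_pairs2_zero_left {α : Type} [BEq α] [LawfulBEq α] [DecidableEq α] (l : List α) (a b : α) (ha : a ∉ l) :
    (pairs2 l).count (a, b) = 0 := by
  rw [List.count_eq_zero]
  exact fun hc => ha (pairs2_mem l (a, b) hc).1

lemma count_pairs2 {α : Type} [BEq α] [LawfulBEq α] [DecidableEq α] (l : List α) (a b : α) (hnd : l.Nodup) (hab : a ≠ b) :
    (pairs2 l).count (a, b) + (pairs2 l).count (b, a)
      = if a ∈ l ∧ b ∈ l then 1 else 0 := by
  induction l with
  | nil => simp [pairs2]
  | cons x xs ih =>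
      have hx : x ∉ xs := (List.nodup_cons.mp hnd).1
      have hxs : xs.Nodup := (List.nodup_cons.mp hnd).2
      rw [pairs2, List.count_append, List.count_append, count_map_pair, count_map_pair]
      by_cases hxa : x = a
      · subst hxa
        have hxb : x ≠ b := hab
        have h0 : (pairs2 xs).count (x, b) = 0 := count_pairs2_zero_left xs x b hx
        have h0' : (pairs2 xs).count (b, x) = 0 := by
          rw [List.count_eq_zero]
          exact fun hc => hx (pairs2_mem xs (b, x) hc).2
        by_cases hb : b ∈ xs
        · have : xs.count b = 1 := List.count_eq_one_of_mem hxs hb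
          simp [hxb, Ne.symm hxb, this, h0, h0', List.mem_cons, hb]
        · have : xs.count b = 0 := List.count_eq_zero_of_not_mem hb
          have hbx : ¬ (b = x) := Ne.symm hxb
          simp [hxb, Ne.symm hxb, this, h0, h0', List.mem_cons, hb, hbx]
      · by_cases hxb : x = b
        · subst hxb
          have h0 : (pairs2 xs).count (x, a) = 0 := count_pairs2_zero_left xs x a hx
          have h0' : (pairs2 xs).count (a, x) = 0 := by
            rw [List.count_eq_zero]
            exact fun hc => hx (pairs2_mem xs (a, x) hc).2
          by_cases hax : a ∈ xs
          · have : xs.count a = 1 := List.count_eq_one_of_mem hxs hax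
            simp [hxa, this, h0, h0', List.mem_cons, hax, Ne.symm hxa]
          · have : xs.count a = 0 := List.count_eq_zero_of_not_mem hax
            simp [hxa, this, h0, h0', List.mem_cons, hax, Ne.symm hxa]
        · have := ih hxs
          simp only [hxa, hxb, if_false, Nat.zero_add, List.mem_cons]
          rw [this]
          have hxa' : ¬ (a = x) := Ne.symm hxa
          have hxb' : ¬ (b = x) := Ne.symm hxb
          simp [hxa', hxb']

lemma count_flatMap_mirror {α : Type} [BEq α] [LawfulBEq α] (P : List (α × α)) (q : α × α) :
    ((P.flatMap (fun p => [p, (p.2, p.1)])).count q) = P.count q + P.count (q.2, q.1) := by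
  induction P with
  | nil => simp
  | cons p P ih =>
      have key : ((p.2, p.1) == q) = (p == (q.2, q.1)) := by
        by_cases h : (p.2, p.1) = q
        · have h' : p = (q.2, q.1) := by rw [← h]
          simp [h, h']
        · have h' : ¬ p = (q.2, q.1) := fun hc => h (by rw [hc])
          simp [h, h']
      simp only [List.flatMap_cons, List.count_append, List.count_cons, List.count_nil, ih, key]
      by_cases h1 : (p == q) = true <;> by_cases h2 : (p == (q.2, q.1)) = true <;>
        simp [h1, h2] <;> omega

lemma count_opsOf (l : List String) (a b : String) (hnd : l.Nodup) (hab : a ≠ b) :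
    (opsOf l).count (a, b) = if a ∈ l ∧ b ∈ l then 1 else 0 := by
  rw [opsOf, count_flatMap_mirror]
  exact count_pairs2 l a b hnd hab

lemma count_flatMap_sum {α β : Type} [BEq β] (l : List α) (f : α → List β) (x : β) :
    (l.flatMap f).count x = (l.map (fun a => (f a).count x)).sum := by
  induction l with
  | nil => rfl
  | cons a l ih => rw [List.flatMap_cons, List.count_append, ih, List.map_cons, List.sum_cons]

lemma sum_ite_eq_countP {α : Type} (l : List α) (p : α → Prop) [DecidablePred p] :
    (l.map (fun a => if p a then 1 else 0)).sum = l.countP (fun a => decide (p a)) := by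
  induction l with
  | nil => rfl
  | cons a l ih =>
      rw [List.map_cons, List.sum_cons, List.countP_cons, ih]
      by_cases h : p a <;> simp [h] <;> omega

-- generic: the "done"-deduplicating assignment fold equals the rStep fold over the
-- deduplicated mirrored pair stream with the final per-pair counts
lemma done_fold (cmpF : String → String → Int) (cntF : String × String → Int)
    (P : List (String × String))
    (h1 : ∀ p ∈ P, p.1 ≠ p.2)
    (h2 : ∀ p ∈ P, cmpF p.1 p.2 = cntF p ∧ cntF (p.2, p.1) = cntF p) :
    P.foldl (fun fin p =>
        if fin.1.contains p then fin
        else ((fin.1.add p).add (p.2, p.1),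
              ((fin.2.modify p.1 PySem.Dict.empty (fun r => r.insert p.2 (cmpF p.1 p.2))).modify
                 p.2 PySem.Dict.empty (fun r => r.insert p.1 (cmpF p.1 p.2)))))
      (PySem.Set.empty, PySem.Dict.empty)
    = (PySem.Set.ofList (P.flatMap (fun p => [p, (p.2, p.1)])),
       ((PySem.Set.ofList (P.flatMap (fun p => [p, (p.2, p.1)]))).map (fun k => (k, cntF k))).foldl
         rStep PySem.Dict.empty) := by
  induction P using List.reverseRecOn with
  | nil => rfl
  | append_singleton P p ih =>
      have h1P : ∀ q ∈ P, q.1 ≠ q.2 := fun q hq => h1 q (List.mem_append_left _ hq)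
      have h2P : ∀ q ∈ P, cmpF q.1 q.2 = cntF q ∧ cntF (q.2, q.1) = cntF q :=
        fun q hq => h2 q (List.mem_append_left _ hq)
      have hpp : p ∈ P ++ [p] := List.mem_append_right _ (List.mem_singleton_self p)
      have hpne : p.1 ≠ p.2 := h1 p hpp
      have hflat : (P ++ [p]).flatMap (fun p => [p, (p.2, p.1)])
          = P.flatMap (fun p => [p, (p.2, p.1)]) ++ [p, (p.2, p.1)] := by
        rw [List.flatMap_append]; rfl
      set ops := P.flatMap (fun p => [p, (p.2, p.1)]) with hops
      have hmirror : ∀ q : String × String, q ∈ ops → (q.2, q.1) ∈ ops := by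
        intro q hq
        rw [hops, List.mem_flatMap] at hq ⊢
        obtain ⟨r, hr, hqr⟩ := hq
        refine ⟨r, hr, ?_⟩
        simp only [List.mem_cons, List.not_mem_nil, or_false] at hqr ⊢
        rcases hqr with h | h
        · subst h; exact Or.inr rfl
        · subst h; exact Or.inl rfl
      rw [List.foldl_append, List.foldl_cons, List.foldl_nil, ih h1P h2P, hflat]
      by_cases hmem : p ∈ PySem.Set.ofList ops
      · have hcontains : (PySem.Set.ofList ops).contains p = true := by
          rw [PySem.Set.contains_iff]; exact hmem
        have hm2 : (p.2, p.1) ∈ PySem.Set.ofList ops := by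
          rw [PySem.Set.mem_ofList] at hmem ⊢
          exact hmirror p hmem
        have hset : PySem.Set.ofList (ops ++ [p, (p.2, p.1)]) = PySem.Set.ofList ops := by
          have : ops ++ [p, (p.2, p.1)] = (ops ++ [p]) ++ [(p.2, p.1)] := by simp
          rw [this, PySem.Set.ofList_append_singleton, PySem.Set.ofList_append_singleton,
            PySem.Set.add_of_mem hmem, PySem.Set.add_of_mem hm2]
        simp only [hcontains, if_true, hset]
      · have hcontains : (PySem.Set.ofList ops).contains p = false := by
          rw [← Bool.not_eq_true, PySem.Set.contains_iff]; exact hmem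
        have hm2 : (p.2, p.1) ∉ PySem.Set.ofList ops := by
          rw [PySem.Set.mem_ofList] at hmem ⊢
          intro hc
          exact hmem (by simpa using hmirror _ hc)
        have hm3 : (p.2, p.1) ∉ PySem.Set.ofList ops ++ [p] := by
          rw [List.mem_append, List.mem_singleton]
          rintro (hc | hc)
          · exact hm2 hc
          · exact hpne (congrArg Prod.snd hc)
        have hset : PySem.Set.ofList (ops ++ [p, (p.2, p.1)]) = PySem.Set.ofList ops ++ [p, (p.2, p.1)] := by
          have : ops ++ [p, (p.2, p.1)] = (ops ++ [p]) ++ [(p.2, p.1)] := by simp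
          rw [this, PySem.Set.ofList_append_singleton, PySem.Set.ofList_append_singleton,
            PySem.Set.add_of_not_mem hmem]
          rw [PySem.Set.add_of_not_mem hm3]
          simp
        have hfst : ((PySem.Set.ofList ops).add p).add (p.2, p.1)
            = PySem.Set.ofList ops ++ [p, (p.2, p.1)] := by
          rw [PySem.Set.add_of_not_mem hmem, PySem.Set.add_of_not_mem hm3]
          simp
        simp only [hcontains, Bool.false_eq_true, if_false, hset]
        have hcnt1 : cmpF p.1 p.2 = cntF p := (h2 p hpp).1
        have hcnt2 : cntF (p.2, p.1) = cntF p := (h2 p hpp).2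
        refine Prod.ext_iff.mpr ⟨hfst, ?_⟩
        rw [List.map_append, List.foldl_append, List.map_cons, List.map_cons, List.map_nil,
          List.foldl_cons, List.foldl_cons, List.foldl_nil, hcnt2, ← hcnt1]
        rfl

-- membership / uniqueness facts about B's grouping structures, by reverse induction over events
lemma grp_getD (events : List (List (String × String))) (sid : String) :
    (events.foldl groupF PySem.Dict.empty).getD sid PySem.Dict.empty
      = (events.filter (fun e => (List.lookup "session_id" e).getD "" == sid)).foldl
          (fun inner e => inner.insert ((List.lookup "target_id" e).getD "") ()) PySem.Dict.empty := by
  induction events using List.reverseRecOn with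
  | nil => rfl
  | append_singleton events e ih =>
      rw [List.foldl_append, List.foldl_cons, List.foldl_nil, List.filter_append]
      show (PySem.Dict.modify _ _ _ _).getD sid PySem.Dict.empty = _
      rw [PySem.Dict.getD_modify]
      by_cases h : sid = (List.lookup "session_id" e).getD ""
      · rw [if_pos h, ← h, ih]
        have hfe : (List.filter (fun e => (List.lookup "session_id" e).getD "" == sid) [e]) = [e] := by
          simp [List.filter_singleton, ← h]
        rw [hfe, List.foldl_append, List.foldl_cons, List.foldl_nil]
      · rw [if_neg h, ih]
        have : (List.filter (fun e => (List.lookup "session_id" e).getD "" == sid) [e]) = [] := by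
          simp [List.filter_singleton, beq_eq_false_iff_ne.mpr (fun hc => h hc.symm)]
        rw [this, List.append_nil]

lemma inner_keys_mem (l : List (List (String × String))) (t : String) :
    t ∈ (l.foldl (fun inner e => inner.insert ((List.lookup "target_id" e).getD "") ()) (PySem.Dict.empty : PySem.Dict String Unit)).keys
      ↔ ∃ e ∈ l, (List.lookup "target_id" e).getD "" = t := by
  induction l using List.reverseRecOn with
  | nil => simp [PySem.Dict.keys_empty]
  | append_singleton l e ih =>
      rw [List.foldl_append, List.foldl_cons, List.foldl_nil, PySem.Dict.mem_keys_insert, ih]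
      constructor
      · rintro (h | ⟨e', he', ht⟩)
        · exact ⟨e, by simp, h.symm⟩
        · exact ⟨e', by simp [he'], ht⟩
      · rintro ⟨e', he', ht⟩
        rcases List.mem_append.mp he' with h | h
        · exact Or.inr ⟨e', h, ht⟩
        · rw [List.mem_singleton] at h; subst h; exact Or.inl ht.symm

lemma inner_keys_nodup (l : List (List (String × String))) :
    (l.foldl (fun inner e => inner.insert ((List.lookup "target_id" e).getD "") ()) (PySem.Dict.empty : PySem.Dict String Unit)).keys.Nodup := by
  induction l using List.reverseRecOn with
  | nil => exact PySem.Dict.nodup_keys_empty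
  | append_singleton l e ih =>
      rw [List.foldl_append, List.foldl_cons, List.foldl_nil]
      exact PySem.Dict.nodup_keys_insert _ _ _ ih

lemma grp_keys_nodup (events : List (List (String × String))) :
    (events.foldl groupF PySem.Dict.empty).keys.Nodup := by
  exact PySem.Dict.nodup_keys_foldl_modify_key events
    (fun e => (List.lookup "session_id" e).getD "") PySem.Dict.empty
    (fun _ e inner => inner.insert ((List.lookup "target_id" e).getD "") ())
    PySem.Dict.empty PySem.Dict.nodup_keys_empty

lemma grp_mem_keys (events : List (List (String × String))) (sid : String) :
    sid ∈ (events.foldl groupF PySem.Dict.empty).keys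
      ↔ ∃ e ∈ events, (List.lookup "session_id" e).getD "" = sid := by
  induction events using List.reverseRecOn with
  | nil => simp [PySem.Dict.keys_empty]
  | append_singleton events e ih =>
      rw [List.foldl_append, List.foldl_cons, List.foldl_nil]
      show sid ∈ (PySem.Dict.modify _ _ _ _).keys ↔ _
      rw [show ∀ (d : PySem.Dict String (PySem.Dict String Unit)) k d0 f,
            PySem.Dict.modify d k d0 f = d.insert k (f (d.getD k d0)) from fun _ _ _ _ => rfl]
      rw [PySem.Dict.mem_keys_insert, ih]
      constructor
      · rintro (h | ⟨e', he', hs⟩)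
        · exact ⟨e, by simp, h.symm⟩
        · exact ⟨e', by simp [he'], hs⟩
      · rintro ⟨e', he', hs⟩
        rcases List.mem_append.mp he' with h | h
        · exact Or.inr ⟨e', h, hs⟩
        · rw [List.mem_singleton] at h; subst h; exact Or.inl hs.symm

lemma inv_getD (events : List (List (String × String))) (t : String) :
    (events.foldl invF PySem.Dict.empty).getD t PySem.Set.empty
      = PySem.Set.ofList ((events.filter (fun e => (List.lookup "target_id" e).getD "" == t)).map
          (fun e => (List.lookup "session_id" e).getD "")) := by
  induction events using List.reverseRecOn with
  | nil => rfl
  | append_singleton events e ih =>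
      rw [List.foldl_append, List.foldl_cons, List.foldl_nil, List.filter_append]
      show (PySem.Dict.modify _ _ _ _).getD t PySem.Set.empty = _
      rw [PySem.Dict.getD_modify]
      by_cases h : t = (List.lookup "target_id" e).getD ""
      · rw [if_pos h, ← h, ih]
        have hfe : (List.filter (fun e => (List.lookup "target_id" e).getD "" == t) [e]) = [e] := by
          simp [List.filter_singleton, ← h]
        rw [hfe, List.map_append, List.map_singleton, PySem.Set.ofList_append_singleton]
      · rw [if_neg h, ih]
        have : (List.filter (fun e => (List.lookup "target_id" e).getD "" == t) [e]) = [] := by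
          simp [List.filter_singleton, beq_eq_false_iff_ne.mpr (fun hc => h hc.symm)]
        rw [this, List.append_nil]

-- the intersection size of the inverted index equals the number of sessions holding both targets
lemma cmp_eq_count (events : List (List (String × String))) (a b : String) (hab : a ≠ b) :
    PySem.Set.len
        (PySem.Set.inter ((events.foldl invF PySem.Dict.empty).getD a PySem.Set.empty)
          ((events.foldl invF PySem.Dict.empty).getD b PySem.Set.empty))
      = ((((events.foldl groupF PySem.Dict.empty).items.flatMap
            (fun q => opsOf q.2.keys)).count (a, b) : Nat) : Int) := by
  set B := events.foldl groupF PySem.Dict.empty with hB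
  have hKnd : B.keys.Nodup := grp_keys_nodup events
  have hitems : B.items = B.keys.map (fun k => (k, B.getD k PySem.Dict.empty)) :=
    PySem.Dict.items_eq_map_keys B hKnd PySem.Dict.empty
  -- per-session target membership
  have hT : ∀ sid t, t ∈ (B.getD sid PySem.Dict.empty).keys
      ↔ ∃ e ∈ events, (List.lookup "session_id" e).getD "" = sid ∧ (List.lookup "target_id" e).getD "" = t := by
    intro sid t
    rw [hB, grp_getD, inner_keys_mem]
    constructor
    · rintro ⟨e, he, ht⟩
      have := List.mem_filter.mp he
      exact ⟨e, this.1, by simpa using this.2, ht⟩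
    · rintro ⟨e, he, hs, ht⟩
      exact ⟨e, List.mem_filter.mpr ⟨he, by simpa using hs⟩, ht⟩
  have hTnd : ∀ sid, (B.getD sid PySem.Dict.empty).keys.Nodup := by
    intro sid; rw [hB, grp_getD]; exact inner_keys_nodup _
  -- count over the flatMap = countP over items
  have hcount : (B.items.flatMap (fun q => opsOf q.2.keys)).count (a, b)
      = B.items.countP (fun q => decide (a ∈ q.2.keys ∧ b ∈ q.2.keys)) := by
    rw [count_flatMap_sum]
    have : B.items.map (fun q => (opsOf q.2.keys).count (a, b))
        = B.items.map (fun q => if a ∈ q.2.keys ∧ b ∈ q.2.keys then 1 else 0) := by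
      refine List.map_congr_left (fun q hq => ?_)
      have hnd : q.2.keys.Nodup := by
        rw [hitems] at hq
        obtain ⟨k, hk, hkq⟩ := List.mem_map.mp hq
        rw [← hkq]
        exact hTnd k
      rw [count_opsOf q.2.keys a b hnd hab]
    rw [this, sum_ite_eq_countP]
  rw [hcount]
  -- the two nodup lists with identical membership
  set I := PySem.Set.inter ((events.foldl invF PySem.Dict.empty).getD a PySem.Set.empty)
      ((events.foldl invF PySem.Dict.empty).getD b PySem.Set.empty) with hI
  set Fl := B.items.filter (fun q => decide (a ∈ q.2.keys ∧ b ∈ q.2.keys)) with hFl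
  have hInd : I.Nodup := by
    rw [hI]
    apply PySem.Set.nodup_inter
    rw [inv_getD]
    exact PySem.Set.nodup_ofList _
  have hFlnd : (Fl.map Prod.fst).Nodup := by
    have hsub : (Fl.map Prod.fst).Sublist (B.items.map Prod.fst) :=
      List.Sublist.map Prod.fst List.filter_sublist
    exact hsub.nodup hKnd
  have hmemI : ∀ sid, sid ∈ I ↔
      ((∃ e ∈ events, (List.lookup "target_id" e).getD "" = a ∧ (List.lookup "session_id" e).getD "" = sid)
       ∧ (∃ e ∈ events, (List.lookup "target_id" e).getD "" = b ∧ (List.lookup "session_id" e).getD "" = sid)) := by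
    intro sid
    rw [hI, PySem.Set.mem_inter, inv_getD, inv_getD, PySem.Set.mem_ofList, PySem.Set.mem_ofList]
    constructor
    · rintro ⟨h1, h2⟩
      obtain ⟨e1, he1, hs1⟩ := List.mem_map.mp h1
      obtain ⟨e2, he2, hs2⟩ := List.mem_map.mp h2
      have hf1 := List.mem_filter.mp he1
      have hf2 := List.mem_filter.mp he2
      exact ⟨⟨e1, hf1.1, by simpa using hf1.2, hs1⟩, ⟨e2, hf2.1, by simpa using hf2.2, hs2⟩⟩
    · rintro ⟨⟨e1, he1, ht1, hs1⟩, ⟨e2, he2, ht2, hs2⟩⟩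
      constructor
      · exact List.mem_map.mpr ⟨e1, List.mem_filter.mpr ⟨he1, by simpa using ht1⟩, hs1⟩
      · exact List.mem_map.mpr ⟨e2, List.mem_filter.mpr ⟨he2, by simpa using ht2⟩, hs2⟩
  have hmemF : ∀ sid, sid ∈ Fl.map Prod.fst ↔
      ((∃ e ∈ events, (List.lookup "target_id" e).getD "" = a ∧ (List.lookup "session_id" e).getD "" = sid)
       ∧ (∃ e ∈ events, (List.lookup "target_id" e).getD "" = b ∧ (List.lookup "session_id" e).getD "" = sid)) := by
    intro sid
    constructor
    · intro h
      obtain ⟨q, hq, hq1⟩ := List.mem_map.mp h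
      have hf := List.mem_filter.mp hq
      have hd := of_decide_eq_true hf.2
      -- identify q.2 with B.getD sid
      rw [hitems] at hf
      obtain ⟨k, hk, hkq⟩ := List.mem_map.mp hf.1
      have hk1 : k = sid := by rw [← hq1, ← hkq]
      have hq2 : q.2 = B.getD sid PySem.Dict.empty := by rw [← hkq, hk1]
      rw [hq2] at hd
      obtain ⟨ha', hb'⟩ := hd
      obtain ⟨e1, he1, hs1, ht1⟩ := (hT sid a).mp ha'
      obtain ⟨e2, he2, hs2, ht2⟩ := (hT sid b).mp hb'
      exact ⟨⟨e1, he1, ht1, hs1⟩, ⟨e2, he2, ht2, hs2⟩⟩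
    · rintro ⟨⟨e1, he1, ht1, hs1⟩, ⟨e2, he2, ht2, hs2⟩⟩
      have hka : a ∈ (B.getD sid PySem.Dict.empty).keys := (hT sid a).mpr ⟨e1, he1, hs1, ht1⟩
      have hkb : b ∈ (B.getD sid PySem.Dict.empty).keys := (hT sid b).mpr ⟨e2, he2, hs2, ht2⟩
      have hsidK : sid ∈ B.keys := by
        rw [hB]
        exact (grp_mem_keys events sid).mpr ⟨e1, he1, hs1⟩
      refine List.mem_map.mpr ⟨(sid, B.getD sid PySem.Dict.empty), ?_, rfl⟩
      rw [hFl]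
      refine List.mem_filter.mpr ⟨?_, by simp [hka, hkb]⟩
      rw [hitems]
      exact List.mem_map.mpr ⟨sid, hsidK, rfl⟩
  have hperm : I.Perm (Fl.map Prod.fst) := by
    rw [List.perm_ext_iff_of_nodup hInd hFlnd]
    intro sid
    rw [hmemI, hmemF]
  have hlen : I.length = Fl.length := by
    rw [hperm.length_eq, List.length_map]
  have hcountP : B.items.countP (fun q => decide (a ∈ q.2.keys ∧ b ∈ q.2.keys)) = Fl.length := by
    rw [hFl, List.countP_eq_length_filter]
  rw [hcountP, ← hlen]
  simp [PySem.Set.len, PySem.List.len_eq]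

lemma flatMap_assoc' {α β γ : Type} (l : List α) (f : α → List β) (g : β → List γ) :
    (l.flatMap f).flatMap g = l.flatMap (fun x => (f x).flatMap g) := by
  induction l with
  | nil => rfl
  | cons x xs ih => rw [List.flatMap_cons, List.flatMap_append, ih, List.flatMap_cons]

lemma count_mirror_symm (P : List (String × String)) (q : String × String) :
    ((P.flatMap (fun p => [p, (p.2, p.1)])).count (q.2, q.1))
      = (P.flatMap (fun p => [p, (p.2, p.1)])).count q := by
  rw [count_flatMap_mirror, count_flatMap_mirror]
  simp [Nat.add_comm]

lemma itemsB_keys_nodup (events : List (List (String × String))) :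
    ∀ q ∈ (events.foldl groupF PySem.Dict.empty).items, (q.2.keys).Nodup := by
  intro q hq
  have hKnd := grp_keys_nodup events
  rw [PySem.Dict.items_eq_map_keys _ hKnd PySem.Dict.empty] at hq
  obtain ⟨k, hk, hkq⟩ := List.mem_map.mp hq
  rw [← hkq]
  show ((events.foldl groupF PySem.Dict.empty).getD k PySem.Dict.empty).keys.Nodup
  rw [grp_getD]
  exact inner_keys_nodup _

theorem co_mentions_main (events : List (List (String × String))) :
    co_mentions_by_session_py events = co_mentions_by_session_py_alt events := by
  unfold co_mentions_by_session_py co_mentions_by_session_py_alt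
  simp only []
  rw [split_fold events PySem.Dict.empty PySem.Dict.empty]
  -- name the two grouping structures
  set B := events.foldl groupF PySem.Dict.empty with hBdef
  set SOf := events.foldl invF PySem.Dict.empty with hSdef
  set itemsB := B.items with hitemsB
  set opsAll := itemsB.flatMap (fun q => opsOf q.2.keys) with hops
  -- ===== A side: the nested increment loops compute canonCo opsAll =====
  have hrel := bySession_rel events PySem.Dict.empty
  rw [show (PySem.Dict.mk ((PySem.Dict.empty : PySem.Dict String (PySem.Dict String Unit)).items.map
    (fun (q : String × PySem.Dict String Unit) => (q.1, PySem.Dict.keys q.2)))) = PySem.Dict.empty from rfl] at hrel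
  have hgroup : events.foldl (fun d e =>
      d.modify ((List.lookup "session_id" e).getD "") PySem.Dict.empty
        (fun inner => inner.insert ((List.lookup "target_id" e).getD "") ())) PySem.Dict.empty = B := by
    rw [hBdef]; rfl
  rw [hgroup] at hrel
  rw [hrel]
  have hA : (PySem.Dict.mk (itemsB.map (fun (q : String × PySem.Dict String Unit) => (q.1, PySem.Dict.keys q.2)))).items.foldl
      (fun co st =>
        (PySem.List.enumerate st.2).foldl (fun co ia =>
          (PySem.List.slice st.2 (some (ia.1 + 1)) none).foldl (fun co b =>
            let co := co.modify ia.2 PySem.Dict.empty (fun c => c.modify b 0 (· + 1))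
            co.modify b PySem.Dict.empty (fun c => c.modify ia.2 0 (· + 1))) co) co)
      PySem.Dict.empty
      = opsAll.foldl coInc PySem.Dict.empty := by
    show (itemsB.map (fun (q : String × PySem.Dict String Unit) => (q.1, PySem.Dict.keys q.2))).foldl _ _ = _
    rw [List.foldl_map, hops, foldl_flatMap']
    exact PySem.List.foldl_congr_mem _ _ _ _ (fun co q _ => sessionA_eq (PySem.Dict.keys q.2) co)
  rw [hA, coFold_eq_canon]
  -- ===== B side: the done-deduplicated intersection assignments compute canonCo opsAll too =====
  -- the candidate pair stream, session by session
  set P := itemsB.flatMap (fun q => pairs2 q.2.keys) with hP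
  have hassoc : P.flatMap (fun p => [p, (p.2, p.1)]) = opsAll := by
    rw [hP, hops, flatMap_assoc']
    rfl
  -- per-pair facts used by done_fold
  have hmemP : ∀ p ∈ P, ∃ q ∈ itemsB, p ∈ pairs2 q.2.keys := by
    intro p hp
    rw [hP, List.mem_flatMap] at hp
    exact hp
  have h1 : ∀ p ∈ P, p.1 ≠ p.2 := by
    intro p hp
    obtain ⟨q, hq, hpq⟩ := hmemP p hp
    exact pairs2_ne _ (itemsB_keys_nodup events q hq) p hpq
  have h2 : ∀ p ∈ P,
      (fun a b => PySem.Set.len (PySem.Set.inter (SOf.getD a PySem.Set.empty) (SOf.getD b PySem.Set.empty))) p.1 p.2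
        = ((List.count p opsAll : Nat) : Int)
      ∧ ((List.count (p.2, p.1) opsAll : Nat) : Int) = ((List.count p opsAll : Nat) : Int) := by
    intro p hp
    have hne := h1 p hp
    constructor
    · have := cmp_eq_count events p.1 p.2 hne
      simpa [Prod.mk.eta] using this
    · rw [← hassoc, count_mirror_symm]
  -- transform B's value loop into the done_fold shape
  have hB1 : B.values.foldl (fun fin tids =>
      (PySem.List.combinations tids.keys 2).foldl (fun fin c =>
        match c with
        | [a, b] =>
          if fin.1.contains (a, b) then fin
          else ((fin.1.add (a, b)).add (b, a),
            ((fin.2.modify a PySem.Dict.empty (fun r => r.insert b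
                (PySem.Set.len (PySem.Set.inter (SOf.getD a PySem.Set.empty) (SOf.getD b PySem.Set.empty))))).modify
              b PySem.Dict.empty (fun r => r.insert a
                (PySem.Set.len (PySem.Set.inter (SOf.getD a PySem.Set.empty) (SOf.getD b PySem.Set.empty))))))
        | _ => fin) fin)
      ((PySem.Set.empty : PySem.Set (String × String)), (PySem.Dict.empty : PySem.Dict String (PySem.Dict String Int)))
      = P.foldl (fun fin p =>
          if fin.1.contains p then fin
          else ((fin.1.add p).add (p.2, p.1),
            ((fin.2.modify p.1 PySem.Dict.empty (fun r => r.insert p.2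
                ((fun a b => PySem.Set.len (PySem.Set.inter (SOf.getD a PySem.Set.empty) (SOf.getD b PySem.Set.empty))) p.1 p.2))).modify
              p.2 PySem.Dict.empty (fun r => r.insert p.1
                ((fun a b => PySem.Set.len (PySem.Set.inter (SOf.getD a PySem.Set.empty) (SOf.getD b PySem.Set.empty))) p.1 p.2)))))
        ((PySem.Set.empty : PySem.Set (String × String)), (PySem.Dict.empty : PySem.Dict String (PySem.Dict String Int))) := by
    show (itemsB.map Prod.snd).foldl _ _ = _
    rw [List.foldl_map, hP, foldl_flatMap']
    refine PySem.List.foldl_congr_mem _ _ _ _ (fun fin q _ => ?_)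
    rw [combinations_two, List.foldl_map]
  rw [hB1, done_fold
    (fun a b => PySem.Set.len (PySem.Set.inter (SOf.getD a PySem.Set.empty) (SOf.getD b PySem.Set.empty)))
    (fun k => ((List.count k opsAll : Nat) : Int)) P h1 h2]
  rw [hassoc]
  have hcounter : (PySem.Set.ofList opsAll).map (fun k => (k, ((List.count k opsAll : Nat) : Int)))
      = (PySem.Dict.counter opsAll).items := (PySem.Dict.items_counter opsAll).symm
  rw [hcounter, reshape_counter_eq_canon]

-- ===== VERDICT (by name: the statement is the Claim_ definition above) =====
theorem co_mentions_by_session_py_spec : Claim_equal_co_mentions_by_session_py := by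
  intro events _ _
  unfold Spec_co_mentions_by_session_py
  exact co_mentions_main events
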